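-- pv_equiv track=rewrite | github.com/brynbarker/Galerkin-Differencing | general_solve/helpers_3d.py | inddel
-- ===== SOURCE A (Python) =====
-- def inddel(r,c,d,ind):
-- 	n = len(r)
-- 	to_pop = [j for j in range(n) if r[j]==ind]
-- 	for j in to_pop[::-1]:
-- 		r.pop(j)
-- 		c.pop(j)
-- 		d.pop(j)
-- 	return r,c,d
-- ===== SOURCE B (Python) =====
-- def inddel(r, c, d, ind):
--     dead = {j for j in range(len(r)) if r[j] == ind}
--     r[:] = [x for j, x in enumerate(r) if j not in dead]
--     c[:] = [x for j, x in enumerate(c) if j not in dead]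
--     d[:] = [x for j, x in enumerate(d) if j not in dead]
--     return r, c, d
-- ===== Notes on version B (the rewrite author's own statement) =====
-- stated objective: alternative
-- what changed: B computes the set of doomed row positions once and rebuilds each list with a single filtering pass (slice-assigned in place), instead of collecting pop indices and popping each one in reverse; it trades A's pop-shifting for one membership-filtered rebuild per list.
import Mathlib
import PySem

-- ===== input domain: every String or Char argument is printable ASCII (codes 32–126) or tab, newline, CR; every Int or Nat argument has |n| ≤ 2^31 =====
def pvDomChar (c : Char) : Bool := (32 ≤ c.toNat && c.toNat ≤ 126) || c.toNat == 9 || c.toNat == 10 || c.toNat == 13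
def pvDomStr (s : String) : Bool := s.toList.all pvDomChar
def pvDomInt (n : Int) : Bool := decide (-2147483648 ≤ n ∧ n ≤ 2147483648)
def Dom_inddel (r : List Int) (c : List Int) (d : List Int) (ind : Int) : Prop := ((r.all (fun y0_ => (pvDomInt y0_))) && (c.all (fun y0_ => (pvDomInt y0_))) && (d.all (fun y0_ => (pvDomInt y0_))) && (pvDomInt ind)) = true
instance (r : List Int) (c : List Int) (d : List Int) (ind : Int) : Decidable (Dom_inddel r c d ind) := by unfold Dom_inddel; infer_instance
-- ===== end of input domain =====

-- B computes the set of doomed row positions once and rebuilds each list in a single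
-- filtering pass, instead of popping each doomed index in reverse; the equivalence
-- proved is about the RETURN value (both Pythons also mutate r, c, d in place).

-- ===== PORT A =====
-- l.pop(j): out of range is a Python IndexError, excluded by Pre_; the port leaves
-- the list unchanged there.
def pvPopAt (l : List Int) (j : Nat) : List Int :=
  match PySem.List.pop? l (j : Int) with
  | some p => p.2
  | none => l

def inddel (r : List Int) (c : List Int) (d : List Int) (ind : Int) : List Int × List Int × List Int :=
  let n := r.length
  let to_pop := (List.range n).filter (fun j => r.getD j 0 == ind)
  (to_pop.reverse).foldl
    (fun (s : List Int × List Int × List Int) j =>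
      (pvPopAt s.1 j, pvPopAt s.2.1 j, pvPopAt s.2.2 j)) (r, c, d)

-- ===== PORT B =====
-- '{j for j in range(len(r)) if r[j] == ind}' is a Python set used only for membership
-- tests; 'l[:] = [x for j, x in enumerate(l) if j not in dead]'s RETURN-relevant value
-- is the filtered list.
def inddel_alt (r : List Int) (c : List Int) (d : List Int) (ind : Int) : List Int × List Int × List Int :=
  let dead : PySem.Set Int :=
    PySem.Set.ofList ((PySem.List.pyRange 0 (PySem.List.len r) 1).filter
      (fun j => PySem.List.pyGetD r j 0 == ind))
  (((PySem.List.enumerate r 0).filter (fun p => !(PySem.Set.contains dead p.1))).map (fun p => p.2),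
   ((PySem.List.enumerate c 0).filter (fun p => !(PySem.Set.contains dead p.1))).map (fun p => p.2),
   ((PySem.List.enumerate d 0).filter (fun p => !(PySem.Set.contains dead p.1))).map (fun p => p.2))

-- ===== PRECONDITION & SPEC =====
-- Pre_ excludes exactly the inputs on which A raises IndexError: some ind-position of r,
-- popped after the later ones, falls outside the current length of c or d.
def Pre_inddel (r : List Int) (c : List Int) (d : List Int) (ind : Int) : Prop :=
  ∀ j, j < r.length → r.getD j 0 = ind →
    (r.take j).countP (fun x => !(x == ind)) + r.countP (fun x => x == ind) ≤ min c.length d.length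
instance (r : List Int) (c : List Int) (d : List Int) (ind : Int) : Decidable (Pre_inddel r c d ind) := by unfold Pre_inddel; infer_instance

def pvWitness_inddel : List Int × List Int × List Int × Int := ([1, 2, 1], [4, 5, 6], [7, 8, 9], 1)

def Spec_inddel (r : List Int) (c : List Int) (d : List Int) (ind : Int) (out : List Int × List Int × List Int) : Prop := out = inddel_alt r c d ind
instance (r : List Int) (c : List Int) (d : List Int) (ind : Int) (out : List Int × List Int × List Int) : Decidable (Spec_inddel r c d ind out) := by unfold Spec_inddel; infer_instance

-- ===== CLAIM (what is proved, stated in full; the proofs are below) =====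
def Claim_equal_inddel : Prop := ∀ (r : List Int) (c : List Int) (d : List Int) (ind : Int), Dom_inddel r c d ind → Pre_inddel r c d ind → Spec_inddel r c d ind (inddel r c d ind)

-- ===== LEMMAS AND PROOFS =====

-- ---- the common canonical form: keep the positions j with q j = false ----

def pvKp (l : List Int) (q : Nat → Bool) : List Int :=
  ((List.range l.length).filter (fun j => !(q j))).map (fun j => l.getD j 0)

def pvPos (r : List Int) (ind : Int) : List Nat :=
  (List.range r.length).filter (fun j => r.getD j 0 == ind)

def pvE (l : List Int) (P : List Nat) : List Int := P.foldr (fun j l => l.eraseIdx j) l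

-- ---- A side: fold of pops over the descending index list ----

theorem pvPopAt_eq_eraseIdx (l : List Int) (j : Nat) : pvPopAt l j = l.eraseIdx j := by
  unfold pvPopAt
  by_cases h : j < l.length
  · rw [PySem.List.pop?_natCast l j h]
  · have h1 : PySem.List.pop? l (j : Int) = none := by
      simp [PySem.List.pop?, PySem.List.pyIdx?]
      omega
    rw [h1, List.eraseIdx_of_length_le (by omega)]

theorem pvTripleFold (P : List Nat) (r c d : List Int) :
    P.foldr (fun j (s : List Int × List Int × List Int) =>
      (pvPopAt s.1 j, pvPopAt s.2.1 j, pvPopAt s.2.2 j)) (r, c, d)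
    = (pvE r P, pvE c P, pvE d P) := by
  induction P with
  | nil => simp [pvE]
  | cons j P ih => simp only [List.foldr_cons]; rw [ih]; simp [pvE, pvPopAt_eq_eraseIdx]

theorem pvA_char (r c d : List Int) (ind : Int) :
    inddel r c d ind = (pvE r (pvPos r ind), pvE c (pvPos r ind), pvE d (pvPos r ind)) := by
  unfold inddel
  rw [List.foldl_reverse, pvTripleFold]
  rfl

-- ---- structural lemmas for pvE, pvPos, pvKp ----

theorem pvE_nil (P : List Nat) : pvE [] P = [] := by
  induction P with
  | nil => rfl
  | cons j P ih =>
    unfold pvE at ih ⊢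
    simp only [List.foldr_cons]
    rw [ih, List.eraseIdx_nil]

theorem pvE_map_succ (l : List Int) (x : Int) (P : List Nat) :
    pvE (x :: l) (P.map (· + 1)) = x :: pvE l P := by
  induction P with
  | nil => simp [pvE]
  | cons j P ih => simp [pvE, List.foldr_cons] at ih ⊢; rw [ih, List.eraseIdx_cons_succ]

theorem pvPos_cons (a : Int) (r : List Int) (ind : Int) :
    pvPos (a :: r) ind = (if a == ind then [0] else []) ++ (pvPos r ind).map (· + 1) := by
  unfold pvPos
  rw [List.length_cons, List.range_succ_eq_map, List.filter_cons, List.filter_map]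
  split_ifs with h <;> simp_all [Function.comp_def, Nat.succ_eq_add_one]

theorem pvE_append (l : List Int) (X Y : List Nat) :
    pvE l (X ++ Y) = X.foldr (fun j l => l.eraseIdx j) (pvE l Y) := by
  simp [pvE, List.foldr_append]

theorem pvMapGetDRange (l : List Int) : (List.range l.length).map (fun j => l.getD j 0) = l := by
  apply List.ext_getElem (by simp)
  intro i h1 h2
  simp [List.getD_eq_getElem?_getD, List.getElem?_eq_getElem h2]

theorem pvKp_false (l : List Int) : pvKp l (fun _ => false) = l := by
  unfold pvKp
  simp only [Bool.not_false, List.filter_true]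
  exact pvMapGetDRange l

theorem pvKp_cons (x : Int) (l : List Int) (q : Nat → Bool) :
    pvKp (x :: l) q = (if q 0 then [] else [x]) ++ pvKp l (fun j => q (j + 1)) := by
  unfold pvKp
  rw [List.length_cons, List.range_succ_eq_map, List.filter_cons, List.filter_map]
  split_ifs with h <;> simp_all [Function.comp_def, Nat.succ_eq_add_one, List.map_map]

theorem pvKp_congr (l : List Int) (q q' : Nat → Bool) (h : ∀ j, q j = q' j) :
    pvKp l q = pvKp l q' := by
  have : q = q' := funext h
  rw [this]

-- ---- the master lemma: descending pops = single filtering pass ----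

theorem pvE_kp : ∀ (r : List Int) (ind : Int) (l : List Int),
    pvE l (pvPos r ind) = pvKp l (fun j => decide (j ∈ pvPos r ind)) := by
  intro r
  induction r with
  | nil =>
    intro ind l
    have hp : pvPos ([] : List Int) ind = [] := rfl
    rw [hp]
    have : (fun j => decide (j ∈ ([] : List Nat))) = (fun _ : Nat => false) := by
      funext j; simp
    rw [this, pvKp_false]
    rfl
  | cons a r ih =>
    intro ind l
    have hshift : ∀ j : Nat, decide ((j + 1) ∈ pvPos (a :: r) ind) = decide (j ∈ pvPos r ind) := by
      intro j
      rw [pvPos_cons]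
      by_cases h : a == ind <;> simp [h]
    match l with
    | [] =>
      rw [pvE_nil]
      rfl
    | x :: l =>
      have hRest : pvKp l (fun j => decide ((j + 1) ∈ pvPos (a :: r) ind))
          = pvKp l (fun j => decide (j ∈ pvPos r ind)) := pvKp_congr _ _ _ hshift
      by_cases h : a == ind
      · have hP : pvPos (a :: r) ind = [0] ++ (pvPos r ind).map (· + 1) := by
          rw [pvPos_cons, if_pos h]
        have h0 : decide ((0 : Nat) ∈ pvPos (a :: r) ind) = true := by
          rw [hP]; simp
        calc pvE (x :: l) (pvPos (a :: r) ind)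
            = pvE l (pvPos r ind) := by
              rw [hP, pvE_append, pvE_map_succ]
              simp only [List.foldr_cons, List.foldr_nil, List.eraseIdx_cons_zero]
          _ = pvKp l (fun j => decide (j ∈ pvPos r ind)) := ih ind l
          _ = pvKp (x :: l) (fun j => decide (j ∈ pvPos (a :: r) ind)) := by
              rw [pvKp_cons]
              simp only [h0, if_true, List.nil_append]
              exact hRest.symm
      · have hP : pvPos (a :: r) ind = (pvPos r ind).map (· + 1) := by
          rw [pvPos_cons, if_neg (by simp_all), List.nil_append]
        have h0 : decide ((0 : Nat) ∈ pvPos (a :: r) ind) = false := by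
          rw [hP]; simp
        calc pvE (x :: l) (pvPos (a :: r) ind)
            = x :: pvE l (pvPos r ind) := by rw [hP, pvE_map_succ]
          _ = x :: pvKp l (fun j => decide (j ∈ pvPos r ind)) := by rw [ih ind l]
          _ = pvKp (x :: l) (fun j => decide (j ∈ pvPos (a :: r) ind)) := by
              rw [pvKp_cons]
              rw [hRest]
              simp [h0]

-- ---- B side: the dead set and the filtering passes reduce to pvKp ----

theorem pvDead_eq (r : List Int) (ind : Int) :
    (PySem.List.pyRange 0 (PySem.List.len r) 1).filter (fun j => PySem.List.pyGetD r j 0 == ind)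
      = (pvPos r ind).map (fun n : Nat => (n : Int)) := by
  have hlen : PySem.List.len r = (r.length : Int) := rfl
  rw [hlen, PySem.List.pyRange_zero_natCast, List.filter_map]
  unfold pvPos
  exact congrArg _ (List.filter_congr (fun k _ => by
    simp [PySem.List.pyGetD_natCast]))

theorem pvContains_dead (r : List Int) (ind : Int) (k : Nat) :
    PySem.Set.contains (PySem.Set.ofList ((PySem.List.pyRange 0 (PySem.List.len r) 1).filter
        (fun j => PySem.List.pyGetD r j 0 == ind))) ((k : Nat) : Int)
      = decide (k ∈ pvPos r ind) := by
  rw [Bool.eq_iff_iff]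
  simp only [PySem.Set.contains_iff, PySem.Set.mem_ofList, pvDead_eq, decide_eq_true_eq]
  exact List.mem_map_of_injective (Nat.cast_injective (R := Int))

theorem pvKeep_eq (r : List Int) (ind : Int) (l : List Int) :
    ((PySem.List.enumerate l 0).filter (fun p => !(PySem.Set.contains
        (PySem.Set.ofList ((PySem.List.pyRange 0 (PySem.List.len r) 1).filter
          (fun j => PySem.List.pyGetD r j 0 == ind))) p.1))).map (fun p => p.2)
      = pvKp l (fun j => decide (j ∈ pvPos r ind)) := by
  rw [PySem.List.enumerate_eq_map_pyRange l 0, List.filter_map, List.map_map]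
  have hlen : PySem.List.len l = (l.length : Int) := rfl
  rw [hlen, PySem.List.pyRange_zero_natCast, List.filter_map, List.map_map]
  unfold pvKp
  rw [List.filter_congr (q := fun k : Nat => !(decide (k ∈ pvPos r ind)))
    (fun k _ => by simp only [Function.comp_def, pvContains_dead r ind k])]
  exact List.map_congr_left (fun k _ => by
    simp [Function.comp_def, PySem.List.pyGetD_natCast])

theorem pvB_char (r c d : List Int) (ind : Int) :
    inddel_alt r c d ind = (pvKp r (fun j => decide (j ∈ pvPos r ind)),
      pvKp c (fun j => decide (j ∈ pvPos r ind)),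
      pvKp d (fun j => decide (j ∈ pvPos r ind))) := by
  unfold inddel_alt
  dsimp only
  rw [pvKeep_eq r ind r, pvKeep_eq r ind c, pvKeep_eq r ind d]

-- ===== VERDICT (by name: the statements are the Claim_ definitions above) =====
theorem inddel_spec : Claim_equal_inddel := by
  intro r c d ind _ _
  unfold Spec_inddel
  rw [pvA_char, pvB_char, pvE_kp r ind r, pvE_kp r ind c, pvE_kp r ind d]
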